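-- pv_equiv track=rewrite | github.com/WasimTTY/epicyon | git.py | gitAddFromHandle
-- ===== SOURCE A (Python) =====
-- def gitAddFromHandle(patchStr: str, handle: str) -> str:
--     """Adds the activitypub handle of the sender to the patch
--     """
--     fromStr = 'AP-signed-off-by: '
--     if fromStr in patchStr:
--         return patchStr
--
--     patchLines = patchStr.split('\n')
--     patchStr = ''
--     for line in patchLines:
--         patchStr += line + '\n'
--         if line.startswith('From:'):
--             if fromStr not in patchStr:
--                 patchStr += fromStr + handle + '\n'
--     return patchStr
-- ===== SOURCE B (Python) =====
-- def gitAddFromHandle(patchStr: str, handle: str) -> str: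
--     """Adds the activitypub handle of the sender to the patch"""
--     fromStr = 'AP-signed-off-by: '
--     if fromStr in patchStr:
--         return patchStr
--     lines = patchStr.split('\n')
--     for i, line in enumerate(lines):
--         if line.startswith('From:'):
--             lines.insert(i + 1, fromStr + handle)
--             break
--     return '\n'.join(lines) + '\n'
-- ===== Notes on version B (the rewrite author's own statement) =====
-- stated objective: simpler
-- what changed: Replaces A's rebuild-the-string loop with a per-iteration substring-membership guard by a locate-then-splice: find the first 'From:' line, insert the signoff line after it and break, then join once; the guard and the repeated string concatenation disappear.
import Mathlib
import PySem

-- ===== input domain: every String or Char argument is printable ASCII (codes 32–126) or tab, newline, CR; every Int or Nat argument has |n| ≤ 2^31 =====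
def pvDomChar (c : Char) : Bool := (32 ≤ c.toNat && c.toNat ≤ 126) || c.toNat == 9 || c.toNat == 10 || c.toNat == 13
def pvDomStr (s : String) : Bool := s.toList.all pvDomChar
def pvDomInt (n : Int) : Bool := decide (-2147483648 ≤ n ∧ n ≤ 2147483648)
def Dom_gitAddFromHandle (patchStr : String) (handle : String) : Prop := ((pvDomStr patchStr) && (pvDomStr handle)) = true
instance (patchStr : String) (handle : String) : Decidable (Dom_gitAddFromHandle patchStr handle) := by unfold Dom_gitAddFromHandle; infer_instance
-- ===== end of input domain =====

-- B replaces A's rebuild-with-membership-guard loop by locate-first-'From:'-line, splice the signoff in, join once (simpler decomposition; same return value).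

-- ===== PORT A =====
def gitAddFromHandle (patchStr : String) (handle : String) : String :=
  let fromStr : String := "AP-signed-off-by: "
  if PySem.Str.isIn fromStr patchStr then patchStr
  else
    let patchLines := PySem.Chars.splitOn patchStr.toList ['\n']
    String.ofList (patchLines.foldl (fun acc line =>
      let acc := acc ++ line ++ ['\n']
      if PySem.Chars.startswith line "From:".toList then
        if PySem.Chars.isIn fromStr.toList acc = false then
          acc ++ fromStr.toList ++ handle.toList ++ ['\n']
        else acc
      else acc) [])

-- ===== PORT B =====
-- the 'enumerate + insert(i+1) + break' scan of Source B as structural recursion on the line list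
def pvInsertAfterFrom (lines : List (List Char)) (signoff : List Char) : List (List Char) :=
  match lines with
  | [] => []
  | l :: rest =>
    if PySem.Chars.startswith l "From:".toList then l :: signoff :: rest
    else l :: pvInsertAfterFrom rest signoff

def gitAddFromHandle_alt (patchStr : String) (handle : String) : String :=
  let fromStr : String := "AP-signed-off-by: "
  if PySem.Str.isIn fromStr patchStr then patchStr
  else
    let lines := PySem.Chars.splitOn patchStr.toList ['\n']
    String.ofList (PySem.Chars.join ['\n'] (pvInsertAfterFrom lines (fromStr.toList ++ handle.toList)) ++ ['\n'])

-- ===== PRECONDITION & SPEC =====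
def Spec_gitAddFromHandle (patchStr : String) (handle : String) (out : String) : Prop := out = gitAddFromHandle_alt patchStr handle
instance (patchStr : String) (handle : String) (out : String) : Decidable (Spec_gitAddFromHandle patchStr handle out) := by unfold Spec_gitAddFromHandle; infer_instance

-- ===== CLAIM (what is proved, stated in full; the proofs are below) =====
def Claim_equal_gitAddFromHandle : Prop := ∀ (patchStr : String) (handle : String), Dom_gitAddFromHandle patchStr handle → Spec_gitAddFromHandle patchStr handle (gitAddFromHandle patchStr handle)

-- ===== LEMMAS AND PROOFS =====

-- A's loop body, named (definitionally equal to the lambda in the port of A)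
def pvStep (F hdl : List Char) (acc line : List Char) : List Char :=
  let acc := acc ++ line ++ ['\n']
  if PySem.Chars.startswith line "From:".toList then
    if PySem.Chars.isIn F acc = false then acc ++ F ++ hdl ++ ['\n'] else acc
  else acc

-- each line followed by '\n': the accumulator shape of A's loop
def pvFlat (ll : List (List Char)) : List Char := (ll.map (· ++ ['\n'])).flatten

theorem pvFlat_eq_join (ll : List (List Char)) (h : ll ≠ []) :
    pvFlat ll = PySem.Chars.join ['\n'] ll ++ ['\n'] := by
  induction ll with
  | nil => simp at h
  | cons l rest ih =>
    cases rest with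
    | nil => simp [pvFlat, PySem.Chars.join_singleton]
    | cons q r =>
      rw [PySem.Chars.join_cons_cons]
      have := ih (by simp)
      simp [pvFlat] at this ⊢
      simp [this]

-- an infix of a ++ c :: b that misses c lies entirely in a or entirely in b
theorem pv_infix_append_cons {F a b : List Char} {c : Char} (h : F <:+: a ++ c :: b) :
    F <:+: a ∨ F <:+: b ∨ c ∈ F := by
  obtain ⟨pre, suf, heq⟩ := h
  have hF : F = ((a ++ c :: b).drop pre.length).take F.length := by
    rw [← heq]; simp
  by_cases h1 : pre.length + F.length ≤ a.length
  · left
    rw [hF, List.drop_append_of_le_length (by omega),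
        List.take_append_of_le_length (by simp; omega)]
    exact ((List.take_prefix _ _).isInfix).trans ((List.drop_suffix _ _).isInfix)
  · by_cases h2 : a.length + 1 ≤ pre.length
    · right; left
      have hsplit : a ++ c :: b = (a ++ [c]) ++ b := by simp
      have hdrop : (a ++ c :: b).drop pre.length = b.drop (pre.length - (a.length + 1)) := by
        rw [hsplit]
        have : pre.length = (a ++ [c]).length + (pre.length - (a.length + 1)) := by
          simp; omega
        rw [this, List.drop_append]
        simp
      rw [hF, hdrop]
      exact ((List.take_prefix _ _).isInfix).trans ((List.drop_suffix _ _).isInfix)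
    · right; right
      have hlenx : (a ++ c :: b).length = a.length + 1 + b.length := by simp; omega
      have hpre : pre.length ≤ a.length := by omega
      have hsuflen : pre.length + F.length ≤ (a ++ c :: b).length := by
        rw [← heq]; simp
      have hj : a.length - pre.length <
          (((a ++ c :: b).drop pre.length).take F.length).length := by
        simp; omega
      have heval : (((a ++ c :: b).drop pre.length).take F.length)[a.length - pre.length]'hj
          = c := by
        rw [List.getElem_take, List.getElem_drop]
        have hix : pre.length + (a.length - pre.length) = a.length := by omega
        simp only [hix]
        rw [List.getElem_append_right (by omega)]
        simp
      have hmem := List.getElem_mem hj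
      rw [heval] at hmem
      rw [hF]
      exact hmem

-- F (nonempty, newline-free) is no infix of the flattened accumulator if it is in no line
theorem pv_not_infix_flat {F : List Char} (h0 : F ≠ []) (h1 : '\n' ∉ F)
    {p : List (List Char)} (h2 : ∀ l ∈ p, ¬ F <:+: l) : ¬ F <:+: pvFlat p := by
  induction p with
  | nil => simpa [pvFlat] using h0
  | cons l rest ih =>
    intro hinf
    have hshape : pvFlat (l :: rest) = l ++ '\n' :: pvFlat rest := by simp [pvFlat]
    rw [hshape] at hinf
    rcases pv_infix_append_cons hinf with h | h | h
    · exact h2 l (by simp) h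
    · exact ih (fun x hx => h2 x (by simp [hx])) h
    · exact h1 h

-- PySem's fueled splitOn on a single-character separator is core List.splitOn
theorem pv_splitOn_go_eq (c : Char) (fuel : Nat) (l cur : List Char) (acc : List (List Char))
    (hfuel : l.length ≤ fuel) :
    PySem.Chars.splitOn.go [c] fuel l cur acc
      = acc.reverse ++ (List.splitOn c l).modifyHead (cur.reverse ++ ·) := by
  induction fuel generalizing l cur acc with
  | zero =>
    have : l = [] := by cases l <;> simp_all
    subst this
    simp [PySem.Chars.splitOn.go, List.splitOn, List.splitOnP_nil]
  | succ fuel ih =>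
    cases l with
    | nil => simp [PySem.Chars.splitOn.go, List.splitOn, List.splitOnP_nil]
    | cons c' rest =>
      by_cases hc : c = c'
      · subst hc
        have hpfx : List.isPrefixOf [c] (c :: rest) = true := by simp [List.isPrefixOf]
        rw [PySem.Chars.splitOn.go, if_pos hpfx]
        simp only [List.length_cons] at hfuel
        rw [show (c :: rest).drop [c].length = rest from by simp]
        rw [ih rest [] (cur.reverse :: acc) (by omega)]
        have hsplit : List.splitOn c (c :: rest) = [] :: List.splitOn c rest := by
          simp [List.splitOn, List.splitOnP_cons]
        rw [hsplit]
        have hmid : ∀ L : List (List Char), List.modifyHead (fun x : List Char => x) L = L :=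
          fun L => congrFun List.modifyHead_id L
        simp [hmid]
      · have hpfx : List.isPrefixOf [c] (c' :: rest) = false := by
          simp [List.isPrefixOf]; exact fun h => absurd h hc
        rw [PySem.Chars.splitOn.go, if_neg (by simp [hpfx])]
        simp only [List.length_cons] at hfuel
        rw [ih rest (c' :: cur) acc (by omega)]
        have hsplit : List.splitOn c (c' :: rest)
            = (List.splitOn c rest).modifyHead (c' :: ·) := by
          simp [List.splitOn, List.splitOnP_cons, Ne.symm hc]
        rw [hsplit, List.modifyHead_modifyHead]
        have hfun : ((fun x : List Char => cur.reverse ++ x) ∘ (fun x => c' :: x))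
            = (fun x : List Char => (c' :: cur).reverse ++ x) := by
          funext x; simp
        rw [hfun]
theorem pv_splitOn_single (c : Char) (s : List Char) :
    PySem.Chars.splitOn s [c] = List.splitOn c s := by
  rw [PySem.Chars.splitOn, pv_splitOn_go_eq c (s.length + 1) s [] [] (by omega)]
  have hmid : ∀ L : List (List Char), List.modifyHead (fun x : List Char => x) L = L :=
    fun L => congrFun List.modifyHead_id L
  simp [hmid]

theorem pv_mem_join_infix {l : List Char} {ls : List (List Char)} (sep : List Char)
    (h : l ∈ ls) : l <:+: PySem.Chars.join sep ls := by
  induction ls with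
  | nil => simp at h
  | cons p rest ih =>
    cases rest with
    | nil =>
      simp at h
      subst h
      simp [PySem.Chars.join_singleton]
    | cons q r =>
      rw [PySem.Chars.join_cons_cons]
      rcases List.mem_cons.mp h with h | h
      · subst h
        exact (List.infix_append_left).trans (List.infix_append_left)
      · exact (ih h).trans ((List.suffix_append _ _).isInfix)

theorem pv_mem_splitOn_infix {c : Char} {s l : List Char} (h : l ∈ List.splitOn c s) :
    l <:+: s := by
  have hj : PySem.Chars.join [c] (List.splitOn c s) = s := List.intercalate_splitOn s c
  exact hj ▸ pv_mem_join_infix [c] h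

theorem pv_splitOn_ne_nil (c : Char) (s : List Char) : List.splitOn c s ≠ [] :=
  List.splitOnP_ne_nil _ s

theorem pv_insertAfterFrom_ne_nil (l : List Char) (rest : List (List Char)) (sig : List Char) :
    pvInsertAfterFrom (l :: rest) sig ≠ [] := by
  rw [pvInsertAfterFrom]
  split <;> simp

-- A's loop once the signoff is present: plain concatenation
theorem pv_phase2 (F hdl : List Char) (ls : List (List Char)) (acc : List Char)
    (h : F <:+: acc) :
    ls.foldl (pvStep F hdl) acc = acc ++ pvFlat ls := by
  induction ls generalizing acc with
  | nil => simp [pvFlat]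
  | cons l rest ih =>
    have hacc : F <:+: acc ++ l ++ ['\n'] :=
      h.trans ((List.infix_append_left).trans (List.infix_append_left))
    have hin : PySem.Chars.isIn F (acc ++ l ++ ['\n']) = true :=
      (PySem.Chars.isIn_iff_infix F _).mpr hacc
    simp only [List.foldl_cons, pvStep, hin]
    split
    · simp only [Bool.true_eq_false, if_false]
      rw [ih _ hacc]
      simp [pvFlat]
    · rw [ih _ hacc]
      simp [pvFlat]

-- A's loop before any signoff: it splices the signoff line after the first 'From:' line
theorem pv_phase1 (F hdl : List Char) (h0 : F ≠ []) (h1 : '\n' ∉ F)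
    (ls p : List (List Char)) (hp : ∀ l ∈ p, ¬ F <:+: l) (hls : ∀ l ∈ ls, ¬ F <:+: l) :
    ls.foldl (pvStep F hdl) (pvFlat p)
      = pvFlat p ++ pvFlat (pvInsertAfterFrom ls (F ++ hdl)) := by
  induction ls generalizing p with
  | nil => simp [pvInsertAfterFrom, pvFlat]
  | cons lx rest ih =>
    have hpl : ∀ x ∈ p ++ [lx], ¬ F <:+: x := by
      intro x hx
      rcases List.mem_append.mp hx with hx | hx
      · exact hp x hx
      · simp at hx
        rw [hx]
        exact hls lx (by simp)
    have hflat : pvFlat p ++ lx ++ ['\n'] = pvFlat (p ++ [lx]) := by simp [pvFlat]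
    have hnin : PySem.Chars.isIn F (pvFlat p ++ lx ++ ['\n']) = false := by
      rw [hflat]
      exact (PySem.Chars.isIn_eq_false_iff F _).mpr (pv_not_infix_flat h0 h1 hpl)
    have hrest : ∀ x ∈ rest, ¬ F <:+: x := fun x hx => hls x (by simp [hx])
    simp only [List.foldl_cons, pvStep, hnin]
    by_cases hfrom : PySem.Chars.startswith lx "From:".toList
    · simp only [hfrom, if_true]
      have hFinf : F <:+: pvFlat p ++ lx ++ ['\n'] ++ F ++ hdl ++ ['\n'] :=
        ⟨pvFlat p ++ lx ++ ['\n'], hdl ++ ['\n'], by simp⟩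
      rw [pv_phase2 F hdl rest _ hFinf]
      rw [pvInsertAfterFrom, if_pos hfrom]
      simp [pvFlat]
    · simp only [hfrom, if_false, Bool.false_eq_true]
      rw [hflat, ih (p ++ [lx]) hpl hrest]
      rw [pvInsertAfterFrom, if_neg hfrom]
      simp [pvFlat]

-- ===== VERDICT (by name: the statement is the Claim_ definition above) =====
theorem gitAddFromHandle_spec : Claim_equal_gitAddFromHandle := by
  intro patchStr handle _
  unfold Spec_gitAddFromHandle gitAddFromHandle gitAddFromHandle_alt
  dsimp only
  by_cases hin : PySem.Str.isIn "AP-signed-off-by: " patchStr = true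
  · rw [if_pos hin, if_pos hin]
  · rw [if_neg hin, if_neg hin]
    have hchars : PySem.Chars.isIn "AP-signed-off-by: ".toList patchStr.toList = false := by
      simpa using hin
    have hnoinf : ¬ "AP-signed-off-by: ".toList <:+: patchStr.toList :=
      (PySem.Chars.isIn_eq_false_iff _ _).mp hchars
    have hls : ∀ l ∈ List.splitOn '\n' patchStr.toList,
        ¬ "AP-signed-off-by: ".toList <:+: l :=
      fun l hl hcon => hnoinf (hcon.trans (pv_mem_splitOn_infix hl))
    show String.ofList
        ((PySem.Chars.splitOn patchStr.toList ['\n']).foldl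
          (pvStep "AP-signed-off-by: ".toList handle.toList) [])
      = String.ofList
        (PySem.Chars.join ['\n']
          (pvInsertAfterFrom (PySem.Chars.splitOn patchStr.toList ['\n'])
            ("AP-signed-off-by: ".toList ++ handle.toList)) ++ ['\n'])
    rw [pv_splitOn_single]
    have h0 : "AP-signed-off-by: ".toList ≠ [] := by decide
    have h1 : '\n' ∉ "AP-signed-off-by: ".toList := by decide
    have hmain := pv_phase1 "AP-signed-off-by: ".toList handle.toList h0 h1
      (List.splitOn '\n' patchStr.toList) [] (by simp) hls
    rw [show ([] : List Char) = pvFlat [] from rfl, hmain]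
    congr 1
    rw [show pvFlat [] = ([] : List Char) from rfl, List.nil_append]
    cases hsp : List.splitOn '\n' patchStr.toList with
    | nil => exact absurd hsp (pv_splitOn_ne_nil _ _)
    | cons l rest =>
      exact pvFlat_eq_join _ (pv_insertAfterFrom_ne_nil l rest _)
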